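-- pv_equiv track=rewrite | github.com/Julesc013/dominium | tools/xstack/core/merkle_tree.py | build_skip_prefixes
-- ===== SOURCE A (Python) =====
-- from typing import Dict, List, Tuple
--
-- DEFAULT_SKIP_PREFIXES: Tuple[str, ...] = (
--     ".xstack_cache/",
--     "build/",
--     "dist/",
--     "tmp/",
--     "tools/auditx/cache/",
--     "tools/compatx/cache/",
--     "tools/performx/cache/",
--     "tools/securex/cache/",
-- )
--
-- def _norm(path: str) -> str:
--     return path.replace("\\", "/").strip("/")
--
-- def build_skip_prefixes(extra_excluded_prefixes: Tuple[str, ...] | None = None) -> Tuple[str, ...]: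
--     prefixes = set(DEFAULT_SKIP_PREFIXES)
--     for value in (extra_excluded_prefixes or ()):
--         token = _norm(str(value))
--         if not token:
--             continue
--         if not token.endswith("/"):
--             token += "/"
--         prefixes.add(token)
--     return tuple(sorted(prefixes))
-- ===== SOURCE B (Python) =====
-- from typing import Tuple
--
-- DEFAULT_SKIP_PREFIXES: Tuple[str, ...] = (
--     ".xstack_cache/",
--     "build/",
--     "dist/",
--     "tmp/",
--     "tools/auditx/cache/",
--     "tools/compatx/cache/",
--     "tools/performx/cache/",
--     "tools/securex/cache/",
-- )
--
-- def _norm(path: str) -> str: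
--     return path.replace("\\", "/").strip("/")
--
-- def _bisect(lst, t):
--     # lower-bound binary search in a sorted list
--     lo, hi = 0, len(lst)
--     while lo < hi:
--         mid = (lo + hi) // 2
--         if lst[mid] < t:
--             lo = mid + 1
--         else:
--             hi = mid
--     return lo
--
-- def _add(lst, t):
--     # insert t into the sorted, duplicate-free list lst (skip if present)
--     i = _bisect(lst, t)
--     if i == len(lst) or lst[i] != t:
--         lst.insert(i, t)
--
-- def build_skip_prefixes(extra_excluded_prefixes: Tuple[str, ...] | None = None) -> Tuple[str, ...]:
--     acc = []
--     for p in DEFAULT_SKIP_PREFIXES: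
--         _add(acc, p)
--     for value in (extra_excluded_prefixes or ()):
--         token = _norm(str(value))
--         if token:
--             _add(acc, token if token.endswith("/") else token + "/")
--     return tuple(acc)
-- ===== Notes on version B (the rewrite author's own statement) =====
-- stated objective: alternative
-- what changed: Replaces A's hash-set accumulation followed by a library sort with an online ordered insertion: every token (defaults and normalized extras) is inserted into a sorted, duplicate-free list by a recursive scan, so no set and no final sort exist.
import Mathlib
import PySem

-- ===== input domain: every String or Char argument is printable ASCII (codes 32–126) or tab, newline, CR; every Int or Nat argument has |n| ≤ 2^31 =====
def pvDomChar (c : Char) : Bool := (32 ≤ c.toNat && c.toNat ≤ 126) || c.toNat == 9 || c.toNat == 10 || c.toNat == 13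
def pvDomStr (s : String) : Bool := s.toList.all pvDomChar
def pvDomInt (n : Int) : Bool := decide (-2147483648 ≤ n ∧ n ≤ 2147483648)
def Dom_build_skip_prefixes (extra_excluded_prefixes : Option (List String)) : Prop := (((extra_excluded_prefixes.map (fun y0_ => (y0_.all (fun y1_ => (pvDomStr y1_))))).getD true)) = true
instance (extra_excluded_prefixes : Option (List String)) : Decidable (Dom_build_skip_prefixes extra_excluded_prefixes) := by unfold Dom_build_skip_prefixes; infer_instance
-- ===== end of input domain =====

-- B drops A's hash set and final library sort and instead keeps a sorted,
-- duplicate-free list throughout, placing each token by a binary search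
-- (lower bound) and inserting it only if absent (objective: alternative).

def DEFAULT_SKIP_PREFIXES : List String :=
  [".xstack_cache/", "build/", "dist/", "tmp/",
   "tools/auditx/cache/", "tools/compatx/cache/",
   "tools/performx/cache/", "tools/securex/cache/"]

-- _norm(path) = path.replace("\\", "/").strip("/")
def pvNorm (path : String) : String :=
  PySem.Str.stripChars (PySem.Str.replace path "\\" "/") "/"

-- ===== PORT A =====
def build_skip_prefixes (extra_excluded_prefixes : Option (List String)) : List String :=
  let prefixes : PySem.Set String := PySem.Set.ofList DEFAULT_SKIP_PREFIXES
  let prefixes := (extra_excluded_prefixes.getD []).foldl (fun s value =>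
    let token := pvNorm value
    if token = "" then s
    else
      let token := if PySem.Str.endswith token "/" then token else token ++ "/"
      PySem.Set.add s token) prefixes
  PySem.List.sorted prefixes (fun x => x) false

-- ===== PORT B =====
-- _bisect(lst, t): lower-bound binary search; the while loop becomes structural
-- recursion on a fuel that bounds hi - lo (the loop runs at most len(lst) steps),
-- so the fuel only makes the same computation total. (lo+hi)//2 on these
-- non-negative ints is exactly Nat division; lst[mid] is accessed only with
-- lo ≤ mid < hi ≤ len, where List.getD is exact.
def pvBisectGo (lst : List String) (t : String) : Nat → Nat → Nat → Nat
  | 0, lo, _ => lo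
  | fuel + 1, lo, hi =>
      if lo < hi then
        let mid := (lo + hi) / 2
        if lst.getD mid "" < t then pvBisectGo lst t fuel (mid + 1) hi
        else pvBisectGo lst t fuel lo mid
      else lo

def pvBisect (lst : List String) (t : String) : Nat :=
  pvBisectGo lst t lst.length 0 lst.length

-- _add(lst, t): insert t into the sorted duplicate-free lst unless present
-- (the Python mutates lst in place; returning the new list is the same value)
def pvAdd (lst : List String) (t : String) : List String :=
  let i := pvBisect lst t
  if i = lst.length ∨ lst.getD i "" ≠ t then PySem.List.insert lst (i : Int) t
  else lst

def build_skip_prefixes_alt (extra_excluded_prefixes : Option (List String)) : List String :=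
  let acc : List String := []
  let acc := DEFAULT_SKIP_PREFIXES.foldl (fun acc p => pvAdd acc p) acc
  let acc := (extra_excluded_prefixes.getD []).foldl (fun acc value =>
    let token := pvNorm value
    if token ≠ "" then
      pvAdd acc (if PySem.Str.endswith token "/" then token else token ++ "/")
    else acc) acc
  acc

-- ===== PRECONDITION & SPEC =====
def Spec_build_skip_prefixes (extra_excluded_prefixes : Option (List String)) (out : List String) : Prop := out = build_skip_prefixes_alt extra_excluded_prefixes
instance (extra_excluded_prefixes : Option (List String)) (out : List String) : Decidable (Spec_build_skip_prefixes extra_excluded_prefixes out) := by unfold Spec_build_skip_prefixes; infer_instance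

-- ===== CLAIM =====
def Claim_equal_build_skip_prefixes : Prop := ∀ (extra_excluded_prefixes : Option (List String)), Dom_build_skip_prefixes extra_excluded_prefixes → Spec_build_skip_prefixes extra_excluded_prefixes (build_skip_prefixes extra_excluded_prefixes)

-- ===== LEMMAS AND PROOFS =====

-- the token (possibly none) contributed by one extra-loop iteration, shared by both ports
def pvContrib (value : String) : List String :=
  let token := pvNorm value
  if token = "" then []
  else if PySem.Str.endswith token "/" then [token] else [token ++ "/"]

theorem contribA (s : PySem.Set String) (v : String) :
    (let token := pvNorm v
     if token = "" then s
     else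
       let token := if PySem.Str.endswith token "/" then token else token ++ "/"
       PySem.Set.add s token) = PySem.Set.update s (pvContrib v) := by
  unfold pvContrib PySem.Set.update
  by_cases h : pvNorm v = ""
  · simp [h]
  · simp [h]
    split_ifs <;> simp

theorem updfold (vs : List String) (s : PySem.Set String) :
    vs.foldl (fun s v => PySem.Set.update s (pvContrib v)) s
      = (vs.flatMap pvContrib).foldl PySem.Set.add s := by
  induction vs generalizing s with
  | nil => simp only [List.foldl_nil, List.flatMap_nil]
  | cons v t ih =>
      rw [List.flatMap_cons, List.foldl_append, List.foldl_cons]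
      exact ih _

theorem foldlA_eq (vs : List String) (s : PySem.Set String) :
    vs.foldl (fun s value =>
      let token := pvNorm value
      if token = "" then s
      else
        let token := if PySem.Str.endswith token "/" then token else token ++ "/"
        PySem.Set.add s token) s
    = (vs.flatMap pvContrib).foldl PySem.Set.add s := by
  trans vs.foldl (fun s v => PySem.Set.update s (pvContrib v)) s
  · apply PySem.List.foldl_congr_mem
    intro acc x _
    exact contribA acc x
  · exact updfold vs s

theorem foldlB_eq (vs : List String) (l : List String) :
    vs.foldl (fun l value =>
      let token := pvNorm value
      if token ≠ "" then
        pvAdd l (if PySem.Str.endswith token "/" then token else token ++ "/")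
      else l) l
    = (vs.flatMap pvContrib).foldl pvAdd l := by
  trans vs.foldl (fun l v => (pvContrib v).foldl pvAdd l) l
  · apply PySem.List.foldl_congr_mem
    intro acc x _
    show _ = (pvContrib x).foldl pvAdd acc
    unfold pvContrib
    by_cases h : pvNorm x = ""
    · simp [h]
    · simp [h]
      split_ifs <;> simp
  · induction vs generalizing l with
    | nil => simp only [List.foldl_nil, List.flatMap_nil]
    | cons v t ih =>
        rw [List.flatMap_cons, List.foldl_append, List.foldl_cons]
        exact ih _

-- reference ordered insertion (proof-only): the value pvAdd computes on a sorted list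
def pvIns (lst : List String) (t : String) : List String :=
  match lst with
  | [] => [t]
  | x :: rest =>
      if t = x then x :: rest
      else if t < x then t :: x :: rest
      else x :: pvIns rest t

theorem mem_pvIns (l : List String) (t y : String) :
    y ∈ pvIns l t ↔ y = t ∨ y ∈ l := by
  induction l with
  | nil => simp [pvIns]
  | cons x r ih =>
      unfold pvIns
      split_ifs with h1 h2
      · subst h1; simp
      · simp
      · simp [ih]; tauto

theorem pairwise_pvIns {l : List String} (t : String) (h : l.Pairwise (· < ·)) :
    (pvIns l t).Pairwise (· < ·) := by
  induction l with
  | nil => simp [pvIns]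
  | cons x r ih =>
      rcases List.pairwise_cons.mp h with ⟨hx, hr⟩
      unfold pvIns
      split_ifs with h1 h2
      · exact h
      · refine List.pairwise_cons.mpr ⟨?_, h⟩
        intro y hy
        rcases List.mem_cons.mp hy with rfl | hy
        · exact h2
        · exact lt_trans h2 (hx y hy)
      · refine List.pairwise_cons.mpr ⟨?_, ih hr⟩
        intro y hy
        rcases (mem_pvIns r t y).mp hy with rfl | hy
        · exact lt_of_le_of_ne (not_lt.mp h2) (Ne.symm h1)
        · exact hx y hy

-- the lower-bound index: length of the `< t` prefix
def pvLB (lst : List String) (t : String) : Nat :=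
  (lst.takeWhile (fun x => decide (x < t))).length

theorem pvIns_cons (x : String) (r : List String) (t : String) :
    pvIns (x :: r) t = if t = x then x :: r else if t < x then t :: x :: r else x :: pvIns r t := rfl

theorem pvLB_nil (t : String) : pvLB [] t = 0 := rfl

theorem pvLB_cons (x : String) (r : List String) (t : String) :
    pvLB (x :: r) t = if x < t then pvLB r t + 1 else 0 := by
  unfold pvLB
  by_cases h : x < t
  · rw [List.takeWhile_cons, if_pos (by simpa using h), if_pos h]
    simp
  · rw [List.takeWhile_cons, if_neg (by simpa using h), if_neg h]
    simp

theorem pvLB_le (lst : List String) (t : String) : pvLB lst t ≤ lst.length := by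
  induction lst with
  | nil => simp [pvLB_nil]
  | cons x r ih =>
      rw [pvLB_cons]
      split_ifs <;> simp only [List.length_cons] <;> omega

theorem pvLB_lt (lst : List String) (t : String) :
    ∀ k, k < pvLB lst t → lst.getD k "" < t := by
  induction lst with
  | nil => intro k hk; simp [pvLB_nil] at hk
  | cons x r ih =>
      intro k hk
      rw [pvLB_cons] at hk
      by_cases hx : x < t
      · rw [if_pos hx] at hk
        cases k with
        | zero => simpa using hx
        | succ k => simpa using ih k (by omega)
      · rw [if_neg hx] at hk; omega

theorem pvLB_stop (lst : List String) (t : String) :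
    pvLB lst t < lst.length → ¬ lst.getD (pvLB lst t) "" < t := by
  induction lst with
  | nil => intro h; simp [pvLB_nil] at h
  | cons x r ih =>
      intro h
      rw [pvLB_cons] at h ⊢
      by_cases hx : x < t
      · rw [if_pos hx] at h ⊢
        simpa using ih (by simpa using h)
      · rw [if_neg hx] at h ⊢
        simpa using hx

-- monotone access on a ≤-sorted list
theorem getD_mono {lst : List String} (hs : lst.Pairwise (· ≤ ·))
    {k m : Nat} (hkm : k ≤ m) (hm : m < lst.length) :
    lst.getD k "" ≤ lst.getD m "" := by
  rcases eq_or_lt_of_le hkm with rfl | hlt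
  · exact le_refl _
  · rw [List.getD_eq_getElem lst "" (lt_trans hlt hm), List.getD_eq_getElem lst "" hm]
    exact (List.pairwise_iff_getElem.mp hs) k m (lt_trans hlt hm) hm hlt

-- the binary search returns an index with the lower-bound characterisation
theorem pvBisect_char (lst : List String) (t : String) (hs : lst.Pairwise (· ≤ ·)) :
    ∀ fuel lo hi, hi - lo ≤ fuel → hi ≤ lst.length → lo ≤ hi →
    (∀ k, k < lo → lst.getD k "" < t) →
    (∀ k, hi ≤ k → k < lst.length → ¬ lst.getD k "" < t) →
    (∀ k, k < pvBisectGo lst t fuel lo hi → lst.getD k "" < t) ∧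
    pvBisectGo lst t fuel lo hi ≤ lst.length ∧
    (pvBisectGo lst t fuel lo hi < lst.length → ¬ lst.getD (pvBisectGo lst t fuel lo hi) "" < t) := by
  intro fuel
  induction fuel with
  | zero =>
      intro lo hi hfuel hhi hle h1 h2
      have : lo = hi := by omega
      subst this
      rw [show pvBisectGo lst t 0 lo lo = lo from rfl]
      exact ⟨h1, le_trans hle hhi, fun hlt => h2 lo (le_refl _) hlt⟩
  | succ n ih =>
      intro lo hi hfuel hhi hle h1 h2
      by_cases hlh : lo < hi
      · rw [show pvBisectGo lst t (n + 1) lo hi =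
            (if lst.getD ((lo + hi) / 2) "" < t then pvBisectGo lst t n ((lo + hi) / 2 + 1) hi
             else pvBisectGo lst t n lo ((lo + hi) / 2)) from by
          simp [pvBisectGo, hlh]]
        have hmid1 : lo ≤ (lo + hi) / 2 := by omega
        have hmid2 : (lo + hi) / 2 < hi := by omega
        by_cases hc : lst.getD ((lo + hi) / 2) "" < t
        · rw [if_pos hc]
          refine ih ((lo + hi) / 2 + 1) hi (by omega) hhi (by omega) ?_ h2
          intro k hk
          rcases Nat.lt_or_ge k lo with hk2 | hk2
          · exact h1 k hk2
          · exact lt_of_le_of_lt (getD_mono hs (by omega) (by omega)) hc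
        · rw [if_neg hc]
          refine ih lo ((lo + hi) / 2) (by omega) (by omega) (by omega) h1 ?_
          intro k hk hk2 hlt
          exact hc (lt_of_le_of_lt (getD_mono hs hk (by omega)) hlt)
      · have : lo = hi := by omega
        subst this
        rw [show pvBisectGo lst t (n + 1) lo lo = lo from by simp [pvBisectGo]]
        exact ⟨h1, le_trans hle hhi, fun hlt => h2 lo (le_refl _) hlt⟩

-- any two indices with the characterisation agree, so bisect computes pvLB
theorem pvBisect_eq_pvLB (lst : List String) (t : String) (hs : lst.Pairwise (· ≤ ·)) :
    pvBisect lst t = pvLB lst t := by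
  unfold pvBisect
  obtain ⟨h1, h2, h3⟩ := pvBisect_char lst t hs (lst.length) 0 lst.length
    (by omega) (le_refl _) (by omega) (by omega) (by omega)
  set i := pvBisectGo lst t lst.length 0 lst.length with hi
  rcases Nat.lt_trichotomy i (pvLB lst t) with h | h | h
  · exact absurd (pvLB_lt lst t i h) (h3 (lt_of_lt_of_le h (pvLB_le lst t)))
  · exact h
  · exact absurd (h1 _ h) (pvLB_stop lst t (lt_of_lt_of_le h h2))

-- pvAdd's value via pvLB equals the reference ordered insertion (no sortedness needed)
theorem pvAddLB_eq_pvIns (lst : List String) (t : String) :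
    (if pvLB lst t = lst.length ∨ lst.getD (pvLB lst t) "" ≠ t
     then PySem.List.insert lst ((pvLB lst t : Nat) : Int) t else lst) = pvIns lst t := by
  induction lst with
  | nil => simp [pvLB_nil, pvIns, PySem.List.insert_zero]
  | cons x r ih =>
      rw [pvLB_cons]
      by_cases hx : x < t
      · rw [if_pos hx]
        have hne : ¬ t = x := fun h => absurd (h ▸ hx) (lt_irrefl x)
        have hnlt : ¬ t < x := fun h => absurd (lt_trans hx h) (lt_irrefl x)
        rw [show pvIns (x :: r) t = x :: pvIns r t from by
          rw [pvIns_cons, if_neg hne, if_neg hnlt]]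
        have hcond : (pvLB r t + 1 = (x :: r).length ∨ (x :: r).getD (pvLB r t + 1) "" ≠ t)
            ↔ (pvLB r t = r.length ∨ r.getD (pvLB r t) "" ≠ t) := by
          simp [List.length_cons]
        by_cases hc : pvLB r t = r.length ∨ r.getD (pvLB r t) "" ≠ t
        · rw [if_pos (hcond.mpr hc)]
          rw [if_pos hc] at ih
          rw [← ih]
          rw [PySem.List.insert_natCast _ _ _ (by simpa using Nat.succ_le_succ (pvLB_le r t)),
              PySem.List.insert_natCast _ _ _ (pvLB_le r t)]
          simp [List.take_succ_cons, List.drop_succ_cons]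
        · rw [if_neg (fun h => hc (hcond.mp h))]
          rw [if_neg hc] at ih
          rw [← ih]
      · rw [if_neg hx]
        rcases eq_or_ne x t with he | he
        · have hnc : ¬ ((0 : Nat) = (x :: r).length ∨ (x :: r).getD 0 "" ≠ t) := by
            simp [he]
          rw [if_neg hnc, pvIns_cons, if_pos he.symm]
        · have hc : ((0 : Nat) = (x :: r).length ∨ (x :: r).getD 0 "" ≠ t) :=
            Or.inr (by simpa using he)
          rw [if_pos hc]
          have htx : t < x := lt_of_le_of_ne (not_lt.mp hx) (Ne.symm he)
          rw [show (((0 : Nat) : Int)) = (0 : Int) from rfl, PySem.List.insert_zero,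
              pvIns_cons, if_neg (Ne.symm he), if_pos htx]

theorem pvAdd_eq_pvIns (lst : List String) (t : String) (hs : lst.Pairwise (· < ·)) :
    pvAdd lst t = pvIns lst t := by
  unfold pvAdd
  rw [pvBisect_eq_pvLB lst t (hs.imp le_of_lt)]
  exact pvAddLB_eq_pvIns lst t

theorem foldl_pvAdd_eq_pvIns (tokens : List String) (acc : List String)
    (hs : acc.Pairwise (· < ·)) :
    tokens.foldl pvAdd acc = tokens.foldl pvIns acc := by
  induction tokens generalizing acc with
  | nil => rfl
  | cons x r ih =>
      rw [List.foldl_cons, List.foldl_cons, pvAdd_eq_pvIns acc x hs]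
      exact ih _ (pairwise_pvIns x hs)

theorem mem_foldl_pvIns (L : List String) (acc : List String) (y : String) :
    y ∈ L.foldl pvIns acc ↔ y ∈ acc ∨ y ∈ L := by
  induction L generalizing acc with
  | nil => simp
  | cons x r ih =>
      rw [List.foldl_cons, ih, mem_pvIns]
      simp
      tauto

theorem pairwise_foldl_pvIns (L : List String) (acc : List String)
    (h : acc.Pairwise (· < ·)) : (L.foldl pvIns acc).Pairwise (· < ·) := by
  induction L generalizing acc with
  | nil => exact h
  | cons x r ih => exact ih _ (pairwise_pvIns x h)

-- sorted(set(L)) equals the ordered-insertion fold of L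
theorem sorted_set_eq_foldl_ins (L : List String) :
    PySem.List.sorted (PySem.Set.ofList L) (fun x => x) false
      = L.foldl pvIns [] := by
  have hpw : (L.foldl pvIns []).Pairwise (· < ·) :=
    pairwise_foldl_pvIns L [] (by simp)
  apply PySem.List.sorted_eq_of_perm_of_pairwise_lt
  · apply (List.perm_ext_iff_of_nodup ?_ ?_).mpr
    · intro y
      rw [mem_foldl_pvIns, PySem.Set.mem_ofList]
      simp
    · exact hpw.imp (fun h => ne_of_lt h)
    · exact PySem.Set.nodup_ofList L
  · exact hpw

-- ===== VERDICT =====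
theorem build_skip_prefixes_spec : Claim_equal_build_skip_prefixes := by
  intro e _
  show build_skip_prefixes e = build_skip_prefixes_alt e
  unfold build_skip_prefixes build_skip_prefixes_alt
  simp only [foldlA_eq, foldlB_eq]
  rw [show ((e.getD []).flatMap pvContrib).foldl PySem.Set.add (PySem.Set.ofList DEFAULT_SKIP_PREFIXES)
        = PySem.Set.ofList (DEFAULT_SKIP_PREFIXES ++ (e.getD []).flatMap pvContrib) from by
      rw [PySem.Set.ofList_eq_foldl (DEFAULT_SKIP_PREFIXES ++ (e.getD []).flatMap pvContrib),
          List.foldl_append, ← PySem.Set.ofList_eq_foldl]]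
  rw [sorted_set_eq_foldl_ins, List.foldl_append]
  rw [show DEFAULT_SKIP_PREFIXES.foldl (fun acc p => pvAdd acc p) [] = DEFAULT_SKIP_PREFIXES.foldl pvAdd [] from rfl]
  rw [foldl_pvAdd_eq_pvIns DEFAULT_SKIP_PREFIXES [] (by simp)]
  rw [foldl_pvAdd_eq_pvIns _ _ (pairwise_foldl_pvIns DEFAULT_SKIP_PREFIXES [] (by simp))]
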